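-- pv_equiv track=rewrite | github.com/ishiikue/exercise | ex06_dictionary.py | count
-- ===== SOURCE A (Python) =====
-- def count(input_list: list[str]) -> dict[str, int]:
--     """Counts the frequency of items in a list and returns a dictionary with item counts."""
--     result_dict = {}
--     for item in input_list:
--         item_lower = item.lower()
--         if item_lower in result_dict:
--             result_dict[item_lower] += 1
--         else:
--             result_dict[item_lower] = 1
--     return result_dict
-- ===== SOURCE B (Python) =====
-- def count(input_list: list[str]) -> dict[str, int]:
--     """Counts the frequency of items in a list and returns a dictionary with item counts."""
--     lowered = [item.lower() for item in input_list]
--     counts = {}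
--     run_key = None
--     run_len = 0
--     for x in sorted(lowered):
--         if x == run_key:
--             run_len += 1
--         else:
--             if run_len:
--                 counts[run_key] = run_len
--             run_key = x
--             run_len = 1
--     if run_len:
--         counts[run_key] = run_len
--     return {k: counts[k] for k in dict.fromkeys(lowered)}
-- ===== Notes on version B (the rewrite author's own statement) =====
-- stated objective: alternative
-- what changed: B replaces A's single-pass hash accumulation with a sort-then-scan-runs strategy: lowercase everything, sort it, fold once over the sorted list accumulating run lengths of consecutive equal items into a counts dict, then emit the dict keyed by the distinct lowered items in first-occurrence order.
import Mathlib
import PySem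

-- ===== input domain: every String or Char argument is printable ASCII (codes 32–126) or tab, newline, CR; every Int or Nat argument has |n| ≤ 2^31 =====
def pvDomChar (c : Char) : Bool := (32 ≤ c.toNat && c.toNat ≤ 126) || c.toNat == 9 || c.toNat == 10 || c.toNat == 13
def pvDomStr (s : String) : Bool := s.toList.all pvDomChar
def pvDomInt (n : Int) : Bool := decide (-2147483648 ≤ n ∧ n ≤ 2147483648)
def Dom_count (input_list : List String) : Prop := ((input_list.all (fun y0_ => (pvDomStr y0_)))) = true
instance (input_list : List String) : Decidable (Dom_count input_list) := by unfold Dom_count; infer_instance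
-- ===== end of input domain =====

-- B replaces A's single-pass dict accumulation by sort-then-scan-runs, emitting keys in first-occurrence order (alternative algorithm, not faster).

-- ===== PORT A =====
-- literal port of A's loop: a dict accumulated item by item, += on present keys, fresh insert of 1 otherwise
def count (input_list : List String) : List (String × Int) :=
  (input_list.foldl
    (fun result_dict item =>
      let item_lower := PySem.Str.lower item
      if result_dict.contains item_lower then
        result_dict.insert item_lower (result_dict.getD item_lower 0 + 1)
      else
        result_dict.insert item_lower 1)
    PySem.Dict.empty).items

-- ===== PORT B =====
-- Source B's loop body: extend the current run, or flush the finished run into counts and start a new one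
-- (run_key is None only while run_len = 0, so the flush never really hits the none branch)
def stepR (st : PySem.Dict String Int × Option String × Int) (x : String) :
    PySem.Dict String Int × Option String × Int :=
  let (counts, runKey, runLen) := st
  if some x == runKey then (counts, runKey, runLen + 1)
  else
    ((if runLen ≠ 0 then
        (match runKey with
         | some k => counts.insert k runLen
         | none => counts)
      else counts), some x, 1)

-- Source B's final 'if run_len: counts[run_key] = run_len'
def finishR (st : PySem.Dict String Int × Option String × Int) : PySem.Dict String Int :=
  if st.2.2 ≠ 0 then
    (match st.2.1 with
     | some k => st.1.insert k st.2.2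
     | none => st.1)
  else st.1

-- literal port of Source B: lowered list, sorted, one fold over runs, output keyed by first-occurrence dedup
-- (counts[k] is looked up with getD 0: every emitted k occurs in lowered, so the key is always present)
def count_alt (input_list : List String) : List (String × Int) :=
  let lowered := input_list.map PySem.Str.lower
  let counts := finishR
    ((PySem.List.sorted lowered (fun x => x) false).foldl stepR (PySem.Dict.empty, none, 0))
  (PySem.List.dedup lowered).map (fun k => (k, counts.getD k 0))

-- ===== PRECONDITION & SPEC =====
def Spec_count (input_list : List String) (out : List (String × Int)) : Prop := out = count_alt input_list
instance (input_list : List String) (out : List (String × Int)) : Decidable (Spec_count input_list out) := by unfold Spec_count; infer_instance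

-- ===== CLAIM (what is proved, stated in full; the proofs are below) =====
def Claim_equal_count : Prop := ∀ (input_list : List String), Dom_count input_list → Spec_count input_list (count input_list)

-- ===== LEMMAS AND PROOFS =====

-- A's loop body is insert-key-(old+1) in both branches: on the absent branch getD is 0.
theorem count_body_eq (d : PySem.Dict String Int) (k : String) :
    (if d.contains k then d.insert k (d.getD k 0 + 1) else d.insert k 1)
      = d.insert k (d.getD k 0 + 1) := by
  by_cases h : d.contains k = true
  · simp [h]
  · simp only [Bool.not_eq_true] at h
    rw [PySem.Dict.getD_of_not_contains (h := h)]
    simp [h]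

-- A's whole loop is Counter(lowered)
theorem count_eq_counter_items (input_list : List String) :
    count input_list = (PySem.Dict.counter (input_list.map PySem.Str.lower)).items := by
  unfold count
  rw [← PySem.Dict.foldl_insert_getD_add_one_eq_counter, List.foldl_map]
  apply congrArg
  apply List.foldl_ext
  intro d x _
  exact count_body_eq d (PySem.Str.lower x)

-- the run-scan invariant: folding from an open run (k0, rl ≥ 1) over a sorted tail all ≥ k0
theorem runs_getD (l : List String) : ∀ (counts : PySem.Dict String Int) (k0 : String) (rl : Int),
    l.Pairwise (· ≤ ·) → (∀ x ∈ l, k0 ≤ x) → 1 ≤ rl →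
    ∀ k, (finishR (l.foldl stepR (counts, some k0, rl))).getD k 0 =
      if k = k0 then rl + l.count k0
      else if k ∈ l then (l.count k : Int)
      else counts.getD k 0 := by
  induction l with
  | nil =>
    intro counts k0 rl _ _ hrl k
    have hne : rl ≠ 0 := by omega
    simp only [List.foldl_nil, finishR, hne, if_true, ne_eq, not_false_iff]
    rw [PySem.Dict.getD_insert]
    simp
  | cons x rest ih =>
    intro counts k0 rl hpw hge hrl k
    have hpw' : rest.Pairwise (· ≤ ·) := (List.pairwise_cons.mp hpw).2
    by_cases hx : x = k0
    · subst hx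
      have hstep : stepR (counts, some x, rl) x = (counts, some x, rl + 1) := by
        simp [stepR]
      rw [List.foldl_cons, hstep]
      have := ih counts x (rl + 1) hpw' (fun y hy => hge y (List.mem_cons_of_mem _ hy)) (by omega) k
      rw [this]
      by_cases hk : k = x
      · subst hk; simp [List.count_cons_self]; ring
      · simp [hk, Ne.symm hk, List.mem_cons]
    · have hk0x : k0 < x := lt_of_le_of_ne (hge x List.mem_cons_self) (Ne.symm hx)
      have hgerest : ∀ y ∈ rest, x ≤ y := fun y hy => (List.pairwise_cons.mp hpw).1 y hy
      have hk0rest : k0 ∉ rest := by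
        intro hmem
        exact absurd (hgerest k0 hmem) (not_le.mpr hk0x)
      have hne : rl ≠ 0 := by omega
      have hstep : stepR (counts, some k0, rl) x = (counts.insert k0 rl, some x, 1) := by
        simp [stepR, hne, hx]
      rw [List.foldl_cons, hstep]
      have := ih (counts.insert k0 rl) x 1 hpw' hgerest le_rfl k
      rw [this]
      by_cases hk : k = k0
      · subst hk
        have hkx : k ≠ x := fun h => hx h.symm
        have hcnt : List.count k (x :: rest) = 0 := by
          simp [List.count_eq_zero, List.mem_cons, hkx, hk0rest]
        simp [hkx, hk0rest, hcnt]
      · by_cases hkx : k = x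
        · subst hkx
          simp [hk, List.count_cons_self]
          ring
        · by_cases hkr : k ∈ rest
          · simp [hk, hkx, Ne.symm hkx, hkr, List.mem_cons]
          · simp [hk, hkx, hkr, PySem.Dict.getD_insert]

-- the scan over the sorted lowered list counts every occurring key exactly
theorem counts_getD_eq_count (lowered : List String) (k : String) (hk : k ∈ lowered) :
    (finishR ((PySem.List.sorted lowered (fun x => x) false).foldl stepR
        (PySem.Dict.empty, none, 0))).getD k 0 = (lowered.count k : Int) := by
  have hperm : (PySem.List.sorted lowered (fun x => x) false).Perm lowered :=
    PySem.List.sorted_perm lowered (fun x => x) false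
  have hpw : (PySem.List.sorted lowered (fun x => x) false).Pairwise (· ≤ ·) := by
    have := PySem.List.sorted_pairwise lowered (fun x => x)
    simpa using this
  have hcount : (PySem.List.sorted lowered (fun x => x) false).count k = lowered.count k :=
    hperm.count_eq k
  have hmem : k ∈ PySem.List.sorted lowered (fun x => x) false := (hperm.mem_iff).mpr hk
  rw [← hcount]
  cases hsrt : PySem.List.sorted lowered (fun x => x) false with
  | nil => rw [hsrt] at hmem; cases hmem
  | cons x rest =>
    rw [hsrt] at hpw hmem
    have hstep : stepR (PySem.Dict.empty, none, 0) x = (PySem.Dict.empty, some x, 1) := by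
      simp [stepR]
    rw [List.foldl_cons, hstep]
    have := runs_getD rest PySem.Dict.empty x 1 (List.pairwise_cons.mp hpw).2
      (fun y hy => (List.pairwise_cons.mp hpw).1 y hy) le_rfl k
    rw [this]
    by_cases hkx : k = x
    · subst hkx; simp [List.count_cons_self]; ring
    · have hkr : k ∈ rest := by
        rcases List.mem_cons.mp hmem with h | h
        · exact absurd h hkx
        · exact h
      simp [hkx, Ne.symm hkx, hkr]

-- ===== VERDICT (by name: the statement is the Claim_ definition above) =====
theorem count_spec : Claim_equal_count := by
  intro input_list _
  unfold Spec_count count_alt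
  rw [count_eq_counter_items, PySem.Dict.items_counter]
  simp only [PySem.List.dedup_eq_ofList]
  apply List.map_congr_left
  intro k hk
  have hkmem : k ∈ input_list.map PySem.Str.lower := (PySem.Set.mem_ofList _ _).mp hk
  rw [counts_getD_eq_count _ k hkmem]
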